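-- pv_equiv track=rewrite | github.com/sid678/Compression-and-Encryption | mhkc.py | binaryToImage
-- ===== SOURCE A (Python) =====
-- def binaryToImage(decipher):
--
--     imgRow = []
--     l = len(decipher)
--     var = 0
--     for i in range(l):
--
--         if i%8==0:
--             if var !=0:
--                 imgRow.append(var)
--             var = 0
--         var = 2*var + decipher[i]
--
--     if var !=0:
--         imgRow.append(var)
--
--     return imgRow
-- ===== SOURCE B (Python) =====
-- def binaryToImage(decipher):
--     imgRow = []
--     n = len(decipher)
--     i = 0
--     while i < n:
--         val = 0
--         for b in decipher[i:i+8]: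
--             val = 2 * val + b
--         if val != 0:
--             imgRow.append(val)
--         i += 8
--     return imgRow
-- ===== Notes on version B (the rewrite author's own statement) =====
-- stated objective: simpler
-- what changed: Replaced the flat index loop with its i%8==0 boundary detection, deferred append and trailing flush by a while loop that slices off 8-element chunks, folds each chunk into a byte value, and appends it when nonzero.
import Mathlib
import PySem

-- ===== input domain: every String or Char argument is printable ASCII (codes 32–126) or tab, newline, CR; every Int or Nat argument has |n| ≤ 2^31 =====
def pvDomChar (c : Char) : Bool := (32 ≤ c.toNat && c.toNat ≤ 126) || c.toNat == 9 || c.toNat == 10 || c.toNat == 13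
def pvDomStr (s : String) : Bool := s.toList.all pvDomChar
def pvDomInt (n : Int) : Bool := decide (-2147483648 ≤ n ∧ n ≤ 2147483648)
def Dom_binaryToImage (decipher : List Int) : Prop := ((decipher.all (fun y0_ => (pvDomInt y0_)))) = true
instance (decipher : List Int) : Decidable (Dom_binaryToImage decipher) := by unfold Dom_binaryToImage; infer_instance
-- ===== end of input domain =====

-- B replaces A's flat index loop (i%8==0 boundary detection, deferred append, trailing flush)
-- by a while loop slicing off 8-element chunks, folding each into a byte value appended when nonzero.


-- ===== PORT A =====
-- literal port: for i in range(l): if i%8==0 flush var into imgRow (if nonzero), var = 2*var + decipher[i]; trailing flush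
def binaryToImage (decipher : List Int) : List Int :=
  let l : Int := decipher.length
  let s :=
    (PySem.List.pyRange 0 l 1).foldl
      (fun (s : List Int × Int) i =>
        let s := if PySem.Int.mod i 8 = 0 then
                   (if s.2 ≠ 0 then s.1 ++ [s.2] else s.1, 0)
                 else s
        (s.1, 2 * s.2 + PySem.List.pyGetD decipher i 0))
      ([], 0)
  if s.2 ≠ 0 then s.1 ++ [s.2] else s.1

-- ===== PORT B =====
-- the while loop of Source B: i steps by 8; chunk = decipher[i:i+8] (PySem slice), fold it, append if nonzero
def chunkFrom (xs : List Int) (i : Nat) : List Int :=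
  if i < xs.length then
    let chunk := PySem.List.slice xs (some (i : Int)) (some ((i : Int) + 8))
    let val := chunk.foldl (fun v b => 2 * v + b) 0
    (if val ≠ 0 then [val] else []) ++ chunkFrom xs (i + 8)
  else []
termination_by xs.length - i

def binaryToImage_alt (decipher : List Int) : List Int := chunkFrom decipher 0

-- ===== PRECONDITION & SPEC =====
def Spec_binaryToImage (decipher : List Int) (out : List Int) : Prop := out = binaryToImage_alt decipher
instance (decipher : List Int) (out : List Int) : Decidable (Spec_binaryToImage decipher out) := by unfold Spec_binaryToImage; infer_instance

-- ===== CLAIM (what is proved, stated in full; the proofs are below) =====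
def Claim_equal_binaryToImage : Prop := ∀ (decipher : List Int), Dom_binaryToImage decipher → Spec_binaryToImage decipher (binaryToImage decipher)

-- ===== LEMMAS AND PROOFS =====

-- proof-side chunk recursion (take/drop form of B's loop)
def chunkLoop : List Int → List Int
  | [] => []
  | x :: t =>
    let chunk := (x :: t).take 8
    let val := chunk.foldl (fun v b => 2 * v + b) 0
    (if val ≠ 0 then [val] else []) ++ chunkLoop ((x :: t).drop 8)
termination_by xs => xs.length
decreasing_by simp

-- A's loop body on an (index, value) pair
def stepE (s : List Int × Int) (p : Int × Int) : List Int × Int :=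
  let s := if PySem.Int.mod p.1 8 = 0 then
             (if s.2 ≠ 0 then s.1 ++ [s.2] else s.1, 0)
           else s
  (s.1, 2 * s.2 + p.2)

-- A's trailing flush
def postF (s : List Int × Int) : List Int := if s.2 ≠ 0 then s.1 ++ [s.2] else s.1

lemma chunkLoop_nil : chunkLoop [] = [] := by rw [chunkLoop]

lemma chunkLoop_cons (x : Int) (t : List Int) :
    chunkLoop (x :: t)
      = (if ((x :: t).take 8).foldl (fun v b => 2 * v + b) 0 ≠ 0
           then [((x :: t).take 8).foldl (fun v b => 2 * v + b) 0] else [])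
        ++ chunkLoop ((x :: t).drop 8) := by
  rw [chunkLoop]

lemma postF_pair (acc : List Int) (v : Int) :
    postF (acc, v) = acc ++ (if v ≠ 0 then [v] else []) := by
  unfold postF
  by_cases h : v = 0 <;> simp [h]

-- convert A's index fold into a fold over enumerate
lemma conv (xs : List Int) (f : (List Int × Int) → Int × Int → (List Int × Int)) :
    ∀ (a : Nat) (s : List Int × Int),
      (PySem.List.pyRange (a : Int) (xs.length : Int) 1).foldl
          (fun s i => f s (i, PySem.List.pyGetD xs i 0)) s
        = (PySem.List.enumerate (xs.drop a) (a : Int)).foldl f s := by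
  intro a
  induction h : xs.length - a generalizing a with
  | zero =>
    intro s
    have ha : xs.length ≤ a := by omega
    rw [PySem.List.pyRange_one_eq_nil (by exact_mod_cast ha)]
    rw [List.drop_eq_nil_of_le ha]
    simp [PySem.List.enumerate]
  | succ n ih =>
    intro s
    have ha : a < xs.length := by omega
    rw [PySem.List.pyRange_one_cons (by exact_mod_cast ha)]
    rw [List.drop_eq_getElem_cons ha]
    rw [PySem.List.enumerate_cons]
    simp only [List.foldl_cons]
    have hget : PySem.List.pyGetD xs (a : Int) 0 = xs[a] := by
      rw [PySem.List.pyGetD_natCast]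
      simp [ha]
    rw [hget]
    have := ih (a + 1) (by omega)
    have hcast : ((a : Int) + 1) = ((a + 1 : Nat) : Int) := by push_cast; ring
    rw [hcast]
    exact this _

-- inside a chunk (indices not ≡ 0 mod 8) A's body only accumulates var
lemma inner_fold (c : List Int) :
    ∀ (j : Int) (acc : List Int) (v : Int),
      (∀ k : Nat, k < c.length → PySem.Int.mod (j + k) 8 ≠ 0) →
      (PySem.List.enumerate c j).foldl stepE (acc, v)
        = (acc, c.foldl (fun v b => 2 * v + b) v) := by
  induction c with
  | nil => intro j acc v _; simp [PySem.List.enumerate]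
  | cons y t ih =>
    intro j acc v h
    rw [PySem.List.enumerate_cons]
    simp only [List.foldl_cons]
    have h0 : PySem.Int.mod j 8 ≠ 0 := by
      have := h 0 (by simp)
      simpa using this
    have hnd : ¬ (8 : Int) ∣ j := fun hd => h0 ((PySem.Int.mod_eq_zero_iff_dvd j 8).mpr hd)
    show (PySem.List.enumerate t (j + 1)).foldl stepE (stepE (acc, v) (j, y)) = _
    have hs : stepE (acc, v) (j, y) = (acc, 2 * v + y) := by
      simp [stepE, hnd]
    rw [hs]
    exact ih (j + 1) acc (2 * v + y) (fun k hk => by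
      have := h (k + 1) (by simpa using Nat.succ_lt_succ hk)
      have e : j + 1 + (k : Int) = j + ((k + 1 : Nat) : Int) := by push_cast; ring
      rw [e]; exact this)

lemma mod8_shift {a : Int} (ha : PySem.Int.mod a 8 = 0) {t : Int} (h1 : 1 ≤ t) (h7 : t ≤ 7) :
    PySem.Int.mod (a + t) 8 ≠ 0 := by
  rw [PySem.Int.mod_eq_emod_of_pos (by norm_num : (0 : Int) < 8)] at ha ⊢
  omega

-- one full boundary-started chunk of A's loop
lemma chunk_fold (c : List Int) (a : Int) (acc : List Int) (v : Int)
    (hne : c ≠ []) (hlen : c.length ≤ 8) (ha : PySem.Int.mod a 8 = 0) :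
    (PySem.List.enumerate c a).foldl stepE (acc, v)
      = (postF (acc, v), c.foldl (fun v b => 2 * v + b) 0) := by
  match c with
  | [] => exact absurd rfl hne
  | y :: t =>
    rw [PySem.List.enumerate_cons]
    simp only [List.foldl_cons]
    have had : (8 : Int) ∣ a := (PySem.Int.mod_eq_zero_iff_dvd a 8).mp ha
    have hs : stepE (acc, v) (a, y) = (postF (acc, v), 2 * 0 + y) := by
      simp [stepE, postF, had]
    rw [hs]
    have ht7 : t.length ≤ 7 := by
      simp only [List.length_cons] at hlen; omega
    exact inner_fold t (a + 1) _ _ (fun k hk => by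
      have hk7 : (k : Int) ≤ 6 := by omega
      have e : a + 1 + (k : Int) = a + (1 + (k : Int)) := by ring
      rw [e]
      exact mod8_shift ha (by omega) (by omega))

lemma enumerate_append (ys zs : List Int) :
    ∀ (a : Int), PySem.List.enumerate (ys ++ zs) a
      = PySem.List.enumerate ys a ++ PySem.List.enumerate zs (a + ys.length) := by
  induction ys with
  | nil => intro a; simp [PySem.List.enumerate]
  | cons y t ih =>
    intro a
    have e : a + 1 + (t.length : Int) = a + ((y :: t).length : Int) := by
      push_cast [List.length_cons]; ring
    rw [List.cons_append, PySem.List.enumerate_cons, ih (a + 1), ← e,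
        PySem.List.enumerate_cons, List.cons_append]

-- main invariant: A's flushed fold over any suffix started at a boundary is B's chunk recursion
lemma main_lemma :
    ∀ (n : Nat) (xs : List Int), xs.length ≤ n →
      ∀ (a : Int) (acc : List Int) (v : Int), PySem.Int.mod a 8 = 0 →
        postF ((PySem.List.enumerate xs a).foldl stepE (acc, v))
          = postF (acc, v) ++ chunkLoop xs := by
  intro n
  induction n with
  | zero =>
    intro xs hxs a acc v _
    have : xs = [] := List.eq_nil_of_length_eq_zero (by omega)
    subst this
    simp [PySem.List.enumerate, chunkLoop_nil]
  | succ n ih =>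
    intro xs hxs a acc v ha
    match xs with
    | [] => simp [PySem.List.enumerate, chunkLoop_nil]
    | x :: t =>
      have hsplit : x :: t = (x :: t).take 8 ++ (x :: t).drop 8 :=
        (List.take_append_drop 8 (x :: t)).symm
      conv_lhs => rw [hsplit, enumerate_append, List.foldl_append]
      rw [chunk_fold _ a acc v (by simp) (List.length_take_le 8 (x :: t)) ha]
      by_cases hr : (x :: t).drop 8 = []
      · rw [hr]
        simp only [PySem.List.enumerate, List.foldl_nil]
        rw [postF_pair, chunkLoop_cons, hr, chunkLoop_nil, postF_pair]
        simp
      · have h8 : 8 ≤ (x :: t).length := by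
          by_contra hc
          exact hr (List.drop_eq_nil_of_le (by omega))
        have hlen8 : ((x :: t).take 8).length = 8 := by
          simp only [List.length_take]; omega
        have ha8 : PySem.Int.mod (a + ((x :: t).take 8).length) 8 = 0 := by
          rw [hlen8]
          rw [PySem.Int.mod_eq_emod_of_pos (by norm_num : (0 : Int) < 8)] at ha ⊢
          push_cast
          omega
        have hlt : ((x :: t).drop 8).length ≤ n := by
          simp only [List.length_drop, List.length_cons] at *
          omega
        rw [ih _ hlt _ _ _ ha8]
        rw [postF_pair]
        conv_rhs => rw [chunkLoop_cons]
        rw [postF_pair]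
        simp

lemma chunkFrom_eq_chunkLoop (xs : List Int) :
    ∀ (i : Nat), chunkFrom xs i = chunkLoop (xs.drop i) := by
  intro i
  induction h : xs.length - i using Nat.strong_induction_on generalizing i with
  | _ n ih =>
    rw [chunkFrom]
    by_cases hi : i < xs.length
    · simp only [hi, if_true]
      have hslice : PySem.List.slice xs (some (i : Int)) (some ((i : Int) + 8))
          = (xs.drop i).take 8 := by
        rw [PySem.List.slice_toNat xs (by positivity) (by positivity)]
        simp
        omega
      rw [hslice]
      obtain ⟨y, t, hyt⟩ : ∃ y t, xs.drop i = y :: t := by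
        match hd : xs.drop i with
        | [] => exact absurd (List.drop_eq_nil_iff.mp hd) (by omega)
        | y :: t => exact ⟨y, t, rfl⟩
      rw [ih (xs.length - (i + 8)) (by omega) (i + 8) rfl]
      conv_rhs => rw [hyt, chunkLoop_cons, ← hyt]
      rw [List.drop_drop]
    · simp only [hi, if_false]
      rw [List.drop_eq_nil_of_le (by omega), chunkLoop_nil]

-- ===== VERDICT (by name: the statement is the Claim_ definition above) =====
theorem binaryToImage_spec : Claim_equal_binaryToImage := by
  intro xs _
  show binaryToImage xs = chunkFrom xs 0
  rw [chunkFrom_eq_chunkLoop xs 0, List.drop_zero]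
  have hconv := conv xs stepE 0 ([], 0)
  simp only [Nat.cast_zero, List.drop_zero] at hconv
  have hmain := main_lemma xs.length xs le_rfl 0 [] 0 (by decide)
  show postF ((PySem.List.pyRange 0 (xs.length : Int) 1).foldl
      (fun s i => stepE s (i, PySem.List.pyGetD xs i 0)) ([], 0)) = chunkLoop xs
  rw [hconv, hmain]
  simp [postF]
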